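-- pv_equiv track=rewrite | github.com/elice-algorithm-study/codingtest | minzy/[220211] 폰켓몬.py | solution
-- ===== SOURCE A (Python) =====
-- def solution(nums):
--     answer = []
--     cnt = 0
--
--     for i in range(len(nums)):
--         if nums[i] in answer:
--             continue
--         else:
--             answer.append(nums[i])
--
--     if len(answer) > len(nums) // 2:
--         answer = answer[:len(nums) // 2]
--         for j in answer:
--             cnt += answer.count(j)
--     else:
--         for k in answer:
--             cnt += answer.count(k)
--
--     return cnt
-- ===== SOURCE B (Python) =====
-- def solution(nums):
--     s = sorted(nums)
--     distinct = 0 if not s else 1 + sum(1 for i in range(1, len(s)) if s[i] != s[i - 1])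
--     return min(distinct, len(nums) // 2)
-- ===== Notes on version B (the rewrite author's own statement) =====
-- stated objective: faster
-- what changed: Replaces A's O(n^2) dedup-by-membership-scan plus count-summing passes with sort-then-adjacent-scan: count distinct values in one linear pass over a sorted copy and cap at n//2.
import Mathlib
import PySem

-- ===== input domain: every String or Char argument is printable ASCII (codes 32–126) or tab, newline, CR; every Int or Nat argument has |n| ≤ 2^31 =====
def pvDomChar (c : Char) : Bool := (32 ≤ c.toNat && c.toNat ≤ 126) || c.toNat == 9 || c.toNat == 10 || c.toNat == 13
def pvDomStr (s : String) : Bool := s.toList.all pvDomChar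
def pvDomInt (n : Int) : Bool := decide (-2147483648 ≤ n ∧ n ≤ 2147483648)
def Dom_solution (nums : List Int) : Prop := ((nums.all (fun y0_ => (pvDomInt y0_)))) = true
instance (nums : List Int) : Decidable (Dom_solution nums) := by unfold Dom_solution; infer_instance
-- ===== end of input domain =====

-- B replaces A's quadratic membership-scan dedup with sort-then-adjacent-scan (objective: faster).

-- ===== PORT A =====
def solution (nums : List Int) : Int :=
  let answer := (PySem.List.pyRange 0 (nums.length : Int) 1).foldl
    (fun acc i =>
      if PySem.List.pyGetD nums i 0 ∈ acc then acc
      else acc ++ [PySem.List.pyGetD nums i 0]) []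
  if (answer.length : Int) > PySem.Int.floordiv (nums.length : Int) 2 then
    let answer2 := PySem.List.slice answer none (some (PySem.Int.floordiv (nums.length : Int) 2))
    answer2.foldl (fun cnt j => cnt + (answer2.count j : Int)) 0
  else
    answer.foldl (fun cnt k => cnt + (answer.count k : Int)) 0

-- ===== PORT B =====
def solution_alt (nums : List Int) : Int :=
  let s := PySem.List.sorted nums (fun x => x) false
  let distinct : Int :=
    if s = [] then 0
    else 1 + (PySem.List.pyRange 1 (s.length : Int) 1).foldl
      (fun acc i =>
        if PySem.List.pyGetD s i 0 ≠ PySem.List.pyGetD s (i - 1) 0 then acc + 1 else acc) 0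
  min distinct (PySem.Int.floordiv (nums.length : Int) 2)

-- ===== PRECONDITION & SPEC =====
def Spec_solution (nums : List Int) (out : Int) : Prop := out = solution_alt nums
instance (nums : List Int) (out : Int) : Decidable (Spec_solution nums out) := by unfold Spec_solution; infer_instance

-- ===== CLAIM (what is proved, stated in full; the proofs are below) =====
def Claim_equal_solution : Prop := ∀ (nums : List Int), Dom_solution nums → Spec_solution nums (solution nums)

-- ===== LEMMAS AND PROOFS =====

-- number of adjacent changes in a :: t
def chg : Int → List Int → Nat
  | _, [] => 0
  | a, b :: t => (if b ≠ a then 1 else 0) + chg b t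

theorem answer_eq_ofList (nums : List Int) :
    (PySem.List.pyRange 0 (nums.length : Int) 1).foldl
      (fun acc i =>
        if PySem.List.pyGetD nums i 0 ∈ acc then acc
        else acc ++ [PySem.List.pyGetD nums i 0]) [] = PySem.Set.ofList nums := by
  rw [PySem.List.foldl_pyRange_zero_pyGetD' nums 0
        (fun acc x => if x ∈ acc then acc else acc ++ [x]) []]
  rw [PySem.Set.ofList_eq_foldl]
  apply PySem.List.foldl_congr_mem
  intro acc x _
  rw [PySem.Set.add_eq_ite]

theorem sum_counts_nodup (l : List Int) (h : l.Nodup) :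
    l.foldl (fun cnt j => cnt + (l.count j : Int)) 0 = (l.length : Int) := by
  rw [PySem.List.foldl_add (g := fun j => ((List.count j l : Int)))]
  have hmap : l.map (fun j => ((List.count j l : Int))) = l.map (fun _ => (1 : Int)) := by
    apply List.map_congr_left
    intro x hx
    simp [List.count_eq_one_of_mem h hx]
  rw [hmap]
  simp [List.sum_replicate]

theorem chg_idx (t : List Int) : ∀ (a : Int),
    (List.range t.length).countP
      (fun k => decide ((a :: t).getD (k + 1) 0 ≠ (a :: t).getD k 0)) = chg a t := by
  induction t with
  | nil => intro a; simp [chg]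
  | cons b t ih =>
    intro a
    simp only [List.length_cons, List.range_succ_eq_map, List.countP_cons, List.countP_map]
    have h2 : List.countP
        ((fun k => decide ((a :: b :: t).getD (k + 1) 0 ≠ (a :: b :: t).getD k 0)) ∘ Nat.succ)
        (List.range t.length) = chg b t := by
      rw [← ih b]
      apply List.countP_congr
      intro k _
      simp [Function.comp]
    rw [h2, chg]
    by_cases hba : b ≠ a <;> simp [hba, Nat.add_comm]

theorem chg_sorted (t : List Int) : ∀ (a : Int), (a :: t).Pairwise (· ≤ ·) →
    1 + chg a t = (a :: t).toFinset.card := by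
  induction t with
  | nil => intro a _; simp [chg]
  | cons b t ih =>
    intro a hp
    have hab : a ≤ b := (List.pairwise_cons.mp hp).1 b (by simp)
    have hbt : (b :: t).Pairwise (· ≤ ·) := (List.pairwise_cons.mp hp).2
    have hib := ih b hbt
    by_cases hba : b = a
    · subst hba
      have hset : (b :: b :: t).toFinset = (b :: t).toFinset := by simp
      rw [chg, hset, if_neg (by simp), Nat.zero_add, hib]
    · have halt : a ∉ (b :: t).toFinset := by
        have haltb : a < b := lt_of_le_of_ne hab (Ne.symm hba)
        intro hmem
        rcases List.mem_cons.mp (List.mem_toFinset.mp hmem) with h | h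
        · omega
        · have : b ≤ a := (List.pairwise_cons.mp hbt).1 a h
          omega
      have hcard : (a :: b :: t).toFinset.card = (b :: t).toFinset.card + 1 := by
        rw [List.toFinset_cons, Finset.card_insert_of_notMem halt]
      rw [chg, if_pos hba, hcard]
      omega

theorem card_ofList (nums : List Int) :
    (PySem.Set.ofList nums).length = nums.toFinset.card := by
  have hn := PySem.Set.nodup_ofList (xs := nums)
  have : (PySem.Set.ofList nums).toFinset = nums.toFinset := by
    ext x; simp [PySem.Set.mem_ofList]
  rw [← this, List.toFinset_card_of_nodup hn]

theorem sorted_card (nums : List Int) :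
    (PySem.List.sorted nums (fun x => x) false).toFinset = nums.toFinset :=
  List.toFinset_eq_of_perm _ _ (PySem.List.sorted_perm nums (fun x => x) false)

theorem countP_pyRange_one (n : Nat) (p : Int → Bool) :
    (PySem.List.pyRange 1 (((n + 1 : Nat)) : Int) 1).countP p
      = (List.range n).countP (fun k => p (((k + 1 : Nat)) : Int)) := by
  induction n with
  | zero => rw [PySem.List.pyRange_one_eq_nil (by simp)]; simp
  | succ n ih =>
    have hcast : (((n + 1 + 1 : Nat)) : Int) = ((n + 1 : Nat) : Int) + 1 := by push_cast; ring
    rw [hcast, PySem.List.pyRange_one_succ_right (by push_cast; omega), List.range_succ,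
        List.countP_append, List.countP_append, ih]
    simp

theorem distinct_eq_card (nums : List Int) (a : Int) (t : List Int)
    (h : PySem.List.sorted nums (fun x => x) false = a :: t) :
    (1 : Int) + (PySem.List.pyRange 1 (((a :: t).length : Int)) 1).foldl
      (fun acc i =>
        if PySem.List.pyGetD (a :: t) i 0 ≠ PySem.List.pyGetD (a :: t) (i - 1) 0 then acc + 1
        else acc) 0 = (nums.toFinset.card : Int) := by
  rw [PySem.List.foldl_ite_add_one]
  have hlen : (((a :: t).length : Int)) = (((t.length + 1 : Nat)) : Int) := by simp
  rw [hlen, countP_pyRange_one]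
  have hc : (List.range t.length).countP
      (fun k => decide (PySem.List.pyGetD (a :: t) (((k + 1 : Nat)) : Int) 0
        ≠ PySem.List.pyGetD (a :: t) ((((k + 1 : Nat)) : Int) - 1) 0)) = chg a t := by
    rw [← chg_idx t a]
    apply List.countP_congr
    intro k _
    have h1 : ((((k + 1 : Nat)) : Int) - 1) = ((k : Nat) : Int) := by push_cast; ring
    rw [h1, PySem.List.pyGetD_natCast, PySem.List.pyGetD_natCast]
  rw [hc]
  have hp : (a :: t).Pairwise (· ≤ ·) := by
    have := PySem.List.sorted_pairwise (xs := nums) (key := fun x => x) 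
    rw [h] at this
    exact this
  have := chg_sorted t a hp
  rw [← sorted_card nums, h]
  omega

-- ===== VERDICT (by name: the statement is the Claim_ definition above) =====
theorem solution_spec : Claim_equal_solution := by
  intro nums _
  rcases h : PySem.List.sorted nums (fun x => x) false with _ | ⟨a, t⟩
  · have hnil : nums = [] := (PySem.List.sorted_eq_nil_iff nums (fun x => x) false).mp h
    subst hnil
    unfold Spec_solution
    decide
  · unfold Spec_solution solution solution_alt
    simp only [h]
    rw [answer_eq_ofList]
    have hk : PySem.Int.floordiv ((nums.length : Int)) 2 = ((nums.length / 2 : Nat) : Int) := by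
      exact_mod_cast PySem.Int.floordiv_natCast nums.length 2
    have hcard := card_ofList nums
    have hB := distinct_eq_card nums a t h
    have hne : (a :: t : List Int) ≠ [] := by simp
    rw [if_neg hne] at *
    rw [hk, hB]
    have hno := PySem.Set.nodup_ofList (xs := nums)
    by_cases hgt : ((PySem.Set.ofList nums).length : Int) > ((nums.length / 2 : Nat) : Int)
    · rw [if_pos hgt]
      rw [PySem.List.slice_to_natCast]
      have hnt : ((PySem.Set.ofList nums).take (nums.length / 2)).Nodup :=
        (List.take_sublist _ _).nodup hno
      rw [sum_counts_nodup _ hnt, List.length_take, hcard]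
      have hlt : nums.length / 2 < nums.toFinset.card := by omega
      simp [Nat.min_eq_left (Nat.le_of_lt hlt)]
      omega
    · rw [if_neg hgt, sum_counts_nodup _ hno, hcard]
      omega
-- ===== VERDICT (by name: the statement is the Claim_ definition above) =====
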